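-- pv_equiv track=rewrite | github.com/deepria/BAEKJOON_Py | 랜덤 마라톤/20250423/32713_숫자 POP.py | func
-- ===== SOURCE A (Python) =====
-- def func(k, a):
--     max_length = 0
--     positions = {} # 숫자별 등장 위치 저장
--     for idx, val in enumerate(a):
--         if val not in positions:
--             positions[val] = []
--         positions[val].append(idx)
--
--     # 각 숫자별로 가능한 연속 구간의 최대 길이 계산
--     for val, pos_list in positions.items():
--         left = 0
--         for right in range(len(pos_list)):
--             # 중간에 삭제해야 할 숫자 수가 K를 초과하면 왼쪽 이동
--             while pos_list[right] - pos_list[left] - (right - left) > k: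
--                 left += 1
--             max_length = max(max_length, right - left + 1)
--
--     return max_length
-- ===== SOURCE B (Python) =====
-- def func(k, a):
--     # Counting re-formulation: per value, with q[i] = pos[i] - i (nondecreasing),
--     # the best run ending at r keeps r - #(entries with q < q[r] - k) + 1 elements.
--     best = 0
--     groups = {}
--     for i, v in enumerate(a):
--         groups.setdefault(v, []).append(i)
--     for p in groups.values():
--         q = [x - i for i, x in enumerate(p)]
--         for r, y in enumerate(q):
--             bad = 0
--             for x in q:
--                 if x < y - k:
--                     bad += 1
--             best = max(best, r - bad + 1)
--     return best
-- ===== Notes on version B (the rewrite author's own statement) =====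
-- stated objective: alternative
-- what changed: A's carried two-pointer (a while loop shrinking a left index that is kept across right endpoints) over each value's position list is replaced by a per-endpoint counting formula on the gap-adjusted positions q[i]=pos[i]-i: the kept count ending at r is r minus the number of q-entries below q[r]-k, plus one, so B has no while loop and no carried pointer state.
import Mathlib
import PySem

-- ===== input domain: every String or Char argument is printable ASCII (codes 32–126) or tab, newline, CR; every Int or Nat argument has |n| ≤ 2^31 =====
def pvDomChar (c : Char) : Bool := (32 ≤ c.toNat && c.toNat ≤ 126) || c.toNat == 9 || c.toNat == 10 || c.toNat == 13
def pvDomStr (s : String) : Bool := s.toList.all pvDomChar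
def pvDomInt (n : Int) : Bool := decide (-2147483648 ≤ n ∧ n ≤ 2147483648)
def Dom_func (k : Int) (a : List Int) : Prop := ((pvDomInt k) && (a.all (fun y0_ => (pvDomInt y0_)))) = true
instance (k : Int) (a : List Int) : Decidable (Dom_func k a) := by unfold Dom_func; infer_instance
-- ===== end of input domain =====

-- B groups positions per value like A, but replaces A's carried two-pointer inner loop by a
-- direct counting formula per right endpoint (alternative decomposition, same observable results).


-- ===== PORT A =====
-- the inner 'while pos_list[right] - pos_list[left] - (right - left) > k: left += 1'
-- (returns the current left when it runs off the end of the list — Python raises IndexError there,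
--  which happens only outside Pre_func)
def funcWhile (k : Int) (p : List Int) (r l : Nat) : Nat :=
  if _h : l < p.length then
    if PySem.List.pyGetD p (r : Int) 0 - PySem.List.pyGetD p (l : Int) 0 - ((r : Int) - (l : Int)) > k then
      funcWhile k p r (l + 1)
    else l
  else l
termination_by p.length - l

def func (k : Int) (a : List Int) : Int :=
  -- positions = {}; for idx, val in enumerate(a): if val not in positions: positions[val] = []; positions[val].append(idx)
  let positions : PySem.Dict Int (List Int) :=
    (PySem.List.enumerate a).foldl (fun d iv =>
      (if d.contains iv.2 then d else d.insert iv.2 []).modify iv.2 [] (fun xs => xs ++ [iv.1]))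
      PySem.Dict.empty
  -- for val, pos_list in positions.items(): left = 0; for right in range(len(pos_list)): …
  positions.items.foldl (fun m vp =>
    ((List.range vp.2.length).foldl (fun (st : Nat × Int) r =>
        let l := funcWhile k vp.2 r st.1
        (l, max st.2 ((r : Int) - (l : Int) + 1))) (0, m)).2) 0

-- ===== PORT B =====
def func_alt (k : Int) (a : List Int) : Int :=
  -- groups = {}; for i, v in enumerate(a): groups.setdefault(v, []).append(i)
  let groups : PySem.Dict Int (List Int) :=
    (PySem.List.enumerate a).foldl (fun d iv =>
      (d.setdefault iv.2 []).modify iv.2 [] (fun xs => xs ++ [iv.1]))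
      PySem.Dict.empty
  -- for p in groups.values(): q = [x - i for i, x in enumerate(p)]; for r, y in enumerate(q): …
  groups.values.foldl (fun best p =>
    let q := (PySem.List.enumerate p).map (fun ix => ix.2 - ix.1)
    (PySem.List.enumerate q).foldl (fun best ry =>
      let bad := q.foldl (fun c x => if x < ry.2 - k then c + 1 else c) (0 : Int)
      max best (ry.1 - bad + 1)) best) 0

-- ===== PRECONDITION & SPEC =====
-- Pre_ excludes exactly k < 0 with a nonempty: there A always raises IndexError
-- (the left pointer runs past the end of a position list) and returns no value.
def Pre_func (k : Int) (a : List Int) : Prop := 0 ≤ k ∨ a = []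
instance (k : Int) (a : List Int) : Decidable (Pre_func k a) := by unfold Pre_func; infer_instance

def pvWitness_func : Int × List Int := (1, [5, 3, 5, 5])

def Spec_func (k : Int) (a : List Int) (out : Int) : Prop := out = func_alt k a
instance (k : Int) (a : List Int) (out : Int) : Decidable (Spec_func k a out) := by unfold Spec_func; infer_instance

-- ===== CLAIM (what is proved, stated in full; the proofs are below) =====
def Claim_equal_func : Prop := ∀ (k : Int) (a : List Int), Dom_func k a → Pre_func k a → Spec_func k a (func k a)

-- ===== LEMMAS AND PROOFS =====

-- the common grouping step both dict-building loops reduce to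
def groupStep (d : PySem.Dict Int (List Int)) (iv : Int × Int) : PySem.Dict Int (List Int) :=
  d.modify iv.2 [] (fun xs => xs ++ [iv.1])

lemma stepA_eq_groupStep (d : PySem.Dict Int (List Int)) (iv : Int × Int) :
    (if d.contains iv.2 then d else d.insert iv.2 []).modify iv.2 [] (fun xs => xs ++ [iv.1])
      = groupStep d iv := by
  unfold groupStep
  by_cases h : d.contains iv.2
  · rw [if_pos h]
  · rw [if_neg h]
    unfold PySem.Dict.modify
    rw [PySem.Dict.insert_insert_self, PySem.Dict.getD_insert_self,
        PySem.Dict.getD_of_not_contains d [] (by simpa using h)]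

lemma stepB_eq_groupStep (d : PySem.Dict Int (List Int)) (iv : Int × Int) :
    (d.setdefault iv.2 []).modify iv.2 [] (fun xs => xs ++ [iv.1]) = groupStep d iv := by
  unfold groupStep
  by_cases h : d.contains iv.2
  · rw [PySem.Dict.setdefault_of_contains d [] h]
  · rw [PySem.Dict.setdefault_of_not_contains d [] (by simpa using h)]
    unfold PySem.Dict.modify
    rw [PySem.Dict.insert_insert_self, PySem.Dict.getD_insert_self,
        PySem.Dict.getD_of_not_contains d [] (by simpa using h)]

-- the grouped dict, canonical form
def groupsOf (a : List Int) : PySem.Dict Int (List Int) :=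
  (PySem.List.enumerate a).foldl groupStep PySem.Dict.empty

lemma groupsOf_keys_nodup (a : List Int) : (groupsOf a).keys.Nodup := by
  show ((PySem.List.enumerate a).foldl (fun d iv => d.modify iv.2 [] (fun xs => xs ++ [iv.1]))
      PySem.Dict.empty).keys.Nodup
  exact PySem.Dict.nodup_keys_foldl_modify_key (PySem.List.enumerate a) (fun x => x.2) []
    (fun _ x xs => xs ++ [x.1]) PySem.Dict.empty PySem.Dict.nodup_keys_empty

lemma enumerate_length {α : Type} (xs : List α) (s : Int) :
    (PySem.List.enumerate xs s).length = xs.length := by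
  conv_rhs => rw [← PySem.List.map_snd_enumerate xs s]
  rw [List.length_map]

lemma enumerate_getElem {α : Type} (xs : List α) (s : Int) (i : Nat) (hi : i < xs.length) :
    (PySem.List.enumerate xs s)[i]'(by rw [enumerate_length]; omega) = (s + (i : Int), xs[i]) := by
  induction xs generalizing s i with
  | nil => exact absurd hi (by simp)
  | cons x t ih =>
    cases i with
    | zero => simp [PySem.List.enumerate]
    | succ n =>
      have hn : n < t.length := by simpa using hi
      simp only [PySem.List.enumerate, List.getElem_cons_succ]
      rw [ih (s + 1) n hn]
      congr 1
      push_cast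
      ring

lemma groupsOf_getD (a : List Int) (c : Int) :
    (groupsOf a).getD c []
      = ((PySem.List.enumerate a).filter (fun iv => iv.2 == c)).map (fun iv => iv.1) := by
  unfold groupsOf groupStep
  rw [← List.foldl_map (f := fun iv : Int × Int => (iv.2, iv.1))
        (g := fun (d : PySem.Dict Int (List Int)) p => d.modify p.1 [] (fun xs => xs ++ [p.2]))]
  rw [PySem.Dict.getD_foldl_modify_append]
  simp [List.filter_map, List.map_map, Function.comp_def]

-- each stored position list is strictly increasing
lemma groupsOf_value_pairwise (a : List Int) (p : List Int) (hp : p ∈ (groupsOf a).values) :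
    p.Pairwise (· < ·) := by
  rcases List.mem_map.mp hp with ⟨pair, hmem, rfl⟩
  obtain ⟨c, v⟩ := pair
  rw [← PySem.Dict.getD_of_mem_items (groupsOf a) hmem (groupsOf_keys_nodup a) []]
  rw [groupsOf_getD]
  exact List.pairwise_map.mpr ((PySem.List.pairwise_lt_enumerate a 0).filter _)

-- q-values: q i = p i - i
def qOf (p : List Int) : List Int := (PySem.List.enumerate p).map (fun ix => ix.2 - ix.1)

lemma qOf_length (p : List Int) : (qOf p).length = p.length := by
  simp [qOf]

lemma qOf_getElem (p : List Int) (i : Nat) (hi : i < p.length) :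
    (qOf p)[i]'(by rw [qOf_length]; omega) = p[i] - (i : Int) := by
  simp only [qOf, List.getElem_map, enumerate_getElem p 0 i hi]
  ring

-- strictly increasing integer lists grow at least by one per step
lemma pairwise_lt_getElem_add_le (p : List Int) (hp : p.Pairwise (· < ·)) (i j : Nat)
    (hij : i ≤ j) (hj : j < p.length) : p[i]'(by omega) + ((j : Int) - (i : Int)) ≤ p[j] := by
  revert hj
  induction j, hij using Nat.le_induction with
  | base => intro hj; simp
  | succ n hn ih =>
    intro hj
    have h1 : n < p.length := by omega
    have h2 := (List.pairwise_iff_getElem.mp hp) n (n + 1) h1 hj (by omega)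
    have h3 := ih h1
    push_cast at *
    omega

lemma qOf_mono (p : List Int) (hp : p.Pairwise (· < ·)) (i j : Nat) (hij : i ≤ j)
    (hj : j < p.length) : (qOf p)[i]'(by rw [qOf_length]; omega) ≤ (qOf p)[j]'(by rw [qOf_length]; omega) := by
  rw [qOf_getElem p i (by omega), qOf_getElem p j hj]
  have := pairwise_lt_getElem_add_le p hp i j hij hj
  omega

-- the count of q-entries below the window threshold, for monotone q
def cOf (k : Int) (p : List Int) (r : Nat) : Nat :=
  (qOf p).countP (fun x => decide (x < (qOf p).getD r 0 - k))

lemma cOf_le (k : Int) (hk : 0 ≤ k) (p : List Int) (hp : p.Pairwise (· < ·)) (r : Nat)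
    (hr : r < p.length) : cOf k p r ≤ r := by
  unfold cOf
  have hql : (qOf p).length = p.length := qOf_length p
  have hgd : (qOf p).getD r 0 = (qOf p)[r]'(by omega) := List.getD_eq_getElem (qOf p) 0 (by omega)
  rw [hgd]
  have hdz : (List.drop r (qOf p)).countP
      (fun x => decide (x < (qOf p)[r]'(by omega) - k)) = 0 := by
    rw [List.countP_eq_zero]
    intro x hx
    rcases List.mem_iff_getElem.mp hx with ⟨i, hilen, rfl⟩
    have hlen2 : r + i < p.length := by
      have := List.length_drop (l := qOf p) (i := r); omega
    simp only [List.getElem_drop, decide_eq_true_eq]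
    have hmono : (qOf p)[r]'(by omega) ≤ (qOf p)[r + i]'(by omega) :=
      qOf_mono p hp r (r + i) (by omega) hlen2
    omega
  calc List.countP (fun x => decide (x < (qOf p)[r]'(by omega) - k)) (qOf p)
      = List.countP (fun x => decide (x < (qOf p)[r]'(by omega) - k))
          (List.take r (qOf p) ++ List.drop r (qOf p)) := by rw [List.take_append_drop]
    _ = _ + _ := List.countP_append
    _ ≤ r := by
        have h1 := List.countP_le_length
          (p := fun x => decide (x < (qOf p)[r]'(by omega) - k)) (l := List.take r (qOf p))
        have h2 : (List.take r (qOf p)).length ≤ r := by rw [List.length_take]; omega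
        omega

lemma lt_cOf_iff (k : Int) (p : List Int) (hp : p.Pairwise (· < ·)) (r l : Nat)
    (hr : r < p.length) (hl : l < p.length) :
    l < cOf k p r ↔ (qOf p)[l]'(by rw [qOf_length]; omega) < (qOf p)[r]'(by rw [qOf_length]; omega) - k := by
  unfold cOf
  have hql : (qOf p).length = p.length := qOf_length p
  have hgd : (qOf p).getD r 0 = (qOf p)[r]'(by omega) := List.getD_eq_getElem (qOf p) 0 (by omega)
  rw [hgd]
  constructor
  · intro hlt
    by_contra hnot
    push Not at hnot
    have hdz : (List.drop l (qOf p)).countP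
        (fun x => decide (x < (qOf p)[r]'(by omega) - k)) = 0 := by
      rw [List.countP_eq_zero]
      intro x hx
      rcases List.mem_iff_getElem.mp hx with ⟨i, hilen, rfl⟩
      have hlen2 : l + i < p.length := by
        have := List.length_drop (l := qOf p) (i := l); omega
      simp only [List.getElem_drop, decide_eq_true_eq]
      have hmono : (qOf p)[l]'(by omega) ≤ (qOf p)[l + i]'(by omega) :=
        qOf_mono p hp l (l + i) (by omega) hlen2
      omega
    have hle : List.countP (fun x => decide (x < (qOf p)[r]'(by omega) - k)) (qOf p) ≤ l := by
      calc List.countP (fun x => decide (x < (qOf p)[r]'(by omega) - k)) (qOf p)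
          = List.countP (fun x => decide (x < (qOf p)[r]'(by omega) - k))
              (List.take l (qOf p) ++ List.drop l (qOf p)) := by rw [List.take_append_drop]
        _ = _ + _ := List.countP_append
        _ ≤ l := by
            have h1 := List.countP_le_length
              (p := fun x => decide (x < (qOf p)[r]'(by omega) - k)) (l := List.take l (qOf p))
            have h2 : (List.take l (qOf p)).length ≤ l := by rw [List.length_take]; omega
            omega
    omega
  · intro hql2
    have hall : List.countP (fun x => decide (x < (qOf p)[r]'(by omega) - k))
        (List.take (l + 1) (qOf p)) = l + 1 := by
      have h2 : (List.take (l + 1) (qOf p)).length = l + 1 := by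
        rw [List.length_take]; omega
      rw [List.countP_eq_length.mpr ?_]
      · omega
      · intro x hx
        rcases List.mem_iff_getElem.mp hx with ⟨i, hilen, rfl⟩
        have hil : i < l + 1 := by omega
        simp only [List.getElem_take, decide_eq_true_eq]
        have hmono : (qOf p)[i]'(by omega) ≤ (qOf p)[l]'(by omega) :=
          qOf_mono p hp i l (by omega) hl
        omega
    have hle := List.Sublist.countP_le
      (p := fun x => decide (x < (qOf p)[r]'(by omega) - k)) (List.take_sublist (l + 1) (qOf p))
    omega

lemma cOf_mono (k : Int) (p : List Int) (hp : p.Pairwise (· < ·)) (r r' : Nat) (hrr : r ≤ r')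
    (hr' : r' < p.length) : cOf k p r ≤ cOf k p r' := by
  unfold cOf
  apply List.countP_mono_left
  intro x _ h
  simp only [decide_eq_true_eq] at h ⊢
  have hql : (qOf p).length = p.length := qOf_length p
  have h1 : (qOf p).getD r 0 = (qOf p)[r]'(by omega) := List.getD_eq_getElem (qOf p) 0 (by omega)
  have h2 : (qOf p).getD r' 0 = (qOf p)[r']'(by omega) := List.getD_eq_getElem (qOf p) 0 (by omega)
  have hmono : (qOf p)[r]'(by omega) ≤ (qOf p)[r']'(by omega) := qOf_mono p hp r r' hrr hr'
  omega

lemma funcWhile_cond_iff (k : Int) (p : List Int) (hp : p.Pairwise (· < ·)) (r l : Nat)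
    (hr : r < p.length) (hl : l < p.length) :
    (PySem.List.pyGetD p (r : Int) 0 - PySem.List.pyGetD p (l : Int) 0 - ((r : Int) - (l : Int)) > k)
      ↔ l < cOf k p r := by
  rw [lt_cOf_iff k p hp r l hr hl, qOf_getElem p l hl, qOf_getElem p r hr]
  rw [PySem.List.pyGetD_natCast, PySem.List.pyGetD_natCast,
      List.getD_eq_getElem p 0 hr, List.getD_eq_getElem p 0 hl]
  constructor <;> intro <;> omega

lemma funcWhile_eq_cOf (k : Int) (hk : 0 ≤ k) (p : List Int) (hp : p.Pairwise (· < ·)) (r : Nat)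
    (hr : r < p.length) (l : Nat) (hl : l ≤ cOf k p r) : funcWhile k p r l = cOf k p r := by
  have hc := cOf_le k hk p hp r hr
  suffices h : ∀ n l, l ≤ cOf k p r → cOf k p r - l = n → funcWhile k p r l = cOf k p r from
    h _ l hl rfl
  intro n
  induction n with
  | zero =>
    intro l hl0 hn
    have hleq : l = cOf k p r := by omega
    rw [funcWhile, dif_pos (show l < p.length by omega), if_neg]
    · exact hleq
    · rw [funcWhile_cond_iff k p hp r l hr (by omega)]
      omega
  | succ n ih =>
    intro l hl0 hn
    rw [funcWhile, dif_pos (show l < p.length by omega), if_pos]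
    · exact ih (l + 1) (by omega) (by omega)
    · rw [funcWhile_cond_iff k p hp r l hr (by omega)]
      omega

lemma enumerate_eq_range_map (xs : List Int) :
    PySem.List.enumerate xs = (List.range xs.length).map (fun (r : Nat) => ((r : Int), xs.getD r 0)) := by
  apply List.ext_getElem (by rw [enumerate_length]; simp)
  intro i h1 h2
  have hi : i < xs.length := by rw [enumerate_length] at h1; simpa using h1
  rw [enumerate_getElem xs 0 i hi]
  simp [List.getD_eq_getElem?_getD, List.getElem?_eq_getElem hi]

-- the carried left pointer at the start of iteration n of A's inner loop
def startOf (k : Int) (p : List Int) : Nat → Nat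
  | 0 => 0
  | n' + 1 => cOf k p n'

lemma loopA_eq (k : Int) (hk : 0 ≤ k) (p : List Int) (hp : p.Pairwise (· < ·)) (n : Nat)
    (hn : n ≤ p.length) (m : Int) :
    ((List.range n).foldl (fun (st : Nat × Int) r =>
        let l := funcWhile k p r st.1
        (l, max st.2 ((r : Int) - (l : Int) + 1))) (0, m))
      = (startOf k p n,
         (List.range n).foldl (fun (b : Int) (r : Nat) =>
            max b ((r : Int) - ((cOf k p r : Nat) : Int) + 1)) m) := by
  induction n with
  | zero => simp [startOf]
  | succ n' ih =>
    rw [List.range_succ, List.foldl_append, List.foldl_append, ih (by omega)]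
    simp only [List.foldl_cons, List.foldl_nil]
    have hstart : startOf k p n' ≤ cOf k p n' := by
      cases n' with
      | zero => exact Nat.zero_le _
      | succ m' => exact cOf_mono k p hp m' (m' + 1) (by omega) (by omega)
    rw [funcWhile_eq_cOf k hk p hp n' (by omega) _ hstart]
    rfl

-- the two inner loops agree on every strictly increasing position list
lemma inner_eq (k : Int) (hk : 0 ≤ k) (p : List Int) (hp : p.Pairwise (· < ·)) (m : Int) :
    ((List.range p.length).foldl (fun (st : Nat × Int) r =>
        let l := funcWhile k p r st.1
        (l, max st.2 ((r : Int) - (l : Int) + 1))) (0, m)).2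
      = (PySem.List.enumerate (qOf p)).foldl (fun best ry =>
          let bad := (qOf p).foldl (fun c x => if x < ry.2 - k then c + 1 else c) (0 : Int)
          max best (ry.1 - bad + 1)) m := by
  rw [loopA_eq k hk p hp p.length le_rfl m]
  rw [enumerate_eq_range_map (qOf p), List.foldl_map, qOf_length]
  apply PySem.List.foldl_congr_mem'
  intro x hx acc
  dsimp only
  rw [PySem.List.foldl_ite_add_one (fun z => z < (qOf p).getD x 0 - k) (qOf p) 0]
  unfold cOf
  norm_num

-- ===== VERDICT (by name: the statement is the Claim_ definition above) =====
theorem func_spec : Claim_equal_func := by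
  intro k a _ hpre
  unfold Spec_func func func_alt
  rcases hpre with hk | rfl
  · simp only [stepA_eq_groupStep, stepB_eq_groupStep]
    show (groupsOf a).items.foldl _ 0 = (groupsOf a).values.foldl _ 0
    rw [show (groupsOf a).values = (groupsOf a).items.map (fun x => x.2) from rfl]
    rw [List.foldl_map]
    apply PySem.List.foldl_congr_mem'
    intro vp hvp acc
    dsimp only
    have hpair : vp.2.Pairwise (· < ·) :=
      groupsOf_value_pairwise a vp.2 (List.mem_map.mpr ⟨vp, hvp, rfl⟩)
    exact inner_eq k hk vp.2 hpair acc
  · rfl
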